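-- pv_equiv track=rewrite | github.com/mf734/random_basic_knowledge | movies_on_flight.py | mof
-- ===== SOURCE A (Python) =====
-- def mof(arr, k):
-- 	k -= 30
-- 	arr = sorted(arr)
-- 	lo, hi = 0, len(arr)-1
-- 	max_val = 0
-- 	while lo < hi:
-- 		if arr[lo] + arr[hi] <= k:
-- 			if max_val < arr[lo] + arr[hi]:
-- 				max_val = arr[lo] + arr[hi]
-- 				i, j = lo, hi
-- 			lo += 1
-- 		else:
-- 			hi -= 1
-- 	return (arr[i], arr[j])
-- ===== SOURCE B (Python) =====
-- def mof(arr, k):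
--     k -= 30
--     arr = sorted(arr)
--     n = len(arr)
--     max_val = 0
--     for i in range(n):
--         for j in range(i + 1, n):
--             s = arr[i] + arr[j]
--             if s <= k and s > max_val:
--                 max_val = s
--                 best = (arr[i], arr[j])
--     return best
-- ===== Notes on version B (the rewrite author's own statement) =====
-- stated objective: alternative
-- what changed: Replaces the linear two-pointer scan over the sorted array with an exhaustive nested double loop over all pairs i<j, keeping the same strict-improvement update so the same maximal pair is returned.
import Mathlib
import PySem

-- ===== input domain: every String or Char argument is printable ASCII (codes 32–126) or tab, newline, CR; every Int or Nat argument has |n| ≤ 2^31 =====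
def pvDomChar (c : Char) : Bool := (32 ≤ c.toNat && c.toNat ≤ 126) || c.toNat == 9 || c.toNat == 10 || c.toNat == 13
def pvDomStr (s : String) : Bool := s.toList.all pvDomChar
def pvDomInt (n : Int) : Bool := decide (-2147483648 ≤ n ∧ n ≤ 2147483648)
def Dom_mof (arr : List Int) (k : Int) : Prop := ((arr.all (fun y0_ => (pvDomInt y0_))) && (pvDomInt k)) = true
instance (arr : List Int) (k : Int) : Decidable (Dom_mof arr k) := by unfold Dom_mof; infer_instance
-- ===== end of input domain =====

-- B replaces A's linear two-pointer scan of the sorted array by an exhaustive nested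
-- double loop over all pairs i<j with the same strict-improvement update (objective:
-- alternative, not faster). Pre_ excludes exactly the inputs on which the Python A
-- (and B alike) raises UnboundLocalError because no pair with positive sum ≤ k-30 exists.


-- ===== PORT A =====
-- A's while loop; lo/hi are Nat (in Python they stay in [0, len-1] whenever the loop
-- runs; for the empty list Python's hi = -1 and Nat's hi = 0 both make the guard false).
-- The loop state (max_val, (i,j)) is returned whole and the caller projects, which is
-- exactly Python's use of the loop variables after the loop. i,j unbound = none
-- (Python raises UnboundLocalError there; excluded by Pre_mof, port returns (0,0)).
def mofLoop (s : List Int) (k : Int) (lo hi : Nat) (mv : Int) (ij : Option (Nat × Nat)) :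
    Int × Option (Nat × Nat) :=
  if lo < hi then
    if s.getD lo 0 + s.getD hi 0 ≤ k then
      if mv < s.getD lo 0 + s.getD hi 0 then
        mofLoop s k (lo + 1) hi (s.getD lo 0 + s.getD hi 0) (some (lo, hi))
      else
        mofLoop s k (lo + 1) hi mv ij
    else
      mofLoop s k lo (hi - 1) mv ij
  else (mv, ij)
termination_by hi - lo
decreasing_by all_goals omega

def mof (arr : List Int) (k : Int) : Int × Int :=
  let k' := k - 30
  let s := PySem.List.sorted arr (fun x => x) false
  match (mofLoop s k' 0 (s.length - 1) 0 none).2 with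
  | some (i, j) => (s.getD i 0, s.getD j 0)
  | none => (0, 0)   -- Python raises UnboundLocalError here; excluded by Pre_mof

-- ===== PORT B =====
-- B's inner 'for j in range(i+1, n)' loop; best stores the value pair directly.
def altInner (s : List Int) (k : Int) (i j : Nat) (mv : Int) (bo : Option (Int × Int)) :
    Int × Option (Int × Int) :=
  if j < s.length then
    if s.getD i 0 + s.getD j 0 ≤ k ∧ mv < s.getD i 0 + s.getD j 0 then
      altInner s k i (j + 1) (s.getD i 0 + s.getD j 0) (some (s.getD i 0, s.getD j 0))
    else
      altInner s k i (j + 1) mv bo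
  else (mv, bo)
termination_by s.length - j

-- B's outer 'for i in range(n)' loop.
def altOuter (s : List Int) (k : Int) (i : Nat) (mv : Int) (bo : Option (Int × Int)) :
    Int × Option (Int × Int) :=
  if i < s.length then
    let st := altInner s k i (i + 1) mv bo
    altOuter s k (i + 1) st.1 st.2
  else (mv, bo)
termination_by s.length - i

def mof_alt (arr : List Int) (k : Int) : Int × Int :=
  let k' := k - 30
  let s := PySem.List.sorted arr (fun x => x) false
  match (altOuter s k' 0 0 none).2 with
  | some p => p
  | none => (0, 0)   -- Python raises UnboundLocalError here; excluded by Pre_mof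

-- ===== PRECONDITION & SPEC =====
-- Pre_mof: some pair of distinct positions has a sum in (0, k-30]; on every other input
-- the Python mof never binds i,j and raises UnboundLocalError (B raises there too).
def Pre_mof (arr : List Int) (k : Int) : Prop :=
  ∃ a ∈ List.range arr.length, ∃ b ∈ List.range arr.length,
    a < b ∧ 0 < arr.getD a 0 + arr.getD b 0 ∧ arr.getD a 0 + arr.getD b 0 ≤ k - 30
instance (arr : List Int) (k : Int) : Decidable (Pre_mof arr k) := by
  unfold Pre_mof; infer_instance

def pvWitness_mof : List Int × Int := ([10, 50], 100)

def Spec_mof (arr : List Int) (k : Int) (out : Int × Int) : Prop := out = mof_alt arr k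
instance (arr : List Int) (k : Int) (out : Int × Int) : Decidable (Spec_mof arr k out) := by
  unfold Spec_mof; infer_instance

-- ===== CLAIM (what is proved, stated in full; the proofs are below) =====
def Claim_equal_mof : Prop :=
  ∀ (arr : List Int) (k : Int), Dom_mof arr k → Pre_mof arr k → Spec_mof arr k (mof arr k)

-- ===== LEMMAS AND PROOFS =====

-- value at a Nat position
def gv (s : List Int) (i : Nat) : Int := s.getD i 0

-- monotonicity of a ≤-sorted list at getD positions
lemma gv_mono {s : List Int} (hs : s.Pairwise (· ≤ ·)) {i j : Nat}
    (hij : i ≤ j) (hj : j < s.length) : gv s i ≤ gv s j := by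
  rcases Nat.lt_or_ge i j with h | h
  · have hi : i < s.length := lt_trans h hj
    have := (List.pairwise_iff_get.mp hs) ⟨i, hi⟩ ⟨j, hj⟩ (by simpa using h)
    simpa [gv, List.getD_eq_getElem?_getD, List.getElem?_eq_getElem, hi, hj] using this
  · have : i = j := le_antisymm hij h
    simp [this]

-- the common characterization of both loops' final state
def Char2 (s : List Int) (k : Int) (st : Int × Option (Int × Int)) : Prop :=
  0 ≤ st.1 ∧
  (∀ a b : Nat, a < b → b < s.length → gv s a + gv s b ≤ k → gv s a + gv s b ≤ st.1) ∧
  (∀ p, st.2 = some p →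
    ∃ a b : Nat, a < b ∧ b < s.length ∧ gv s a + gv s b = st.1 ∧ st.1 ≤ k ∧ 0 < st.1 ∧
      p = (gv s a, gv s b) ∧
      (∀ a' b' : Nat, a' < a → a' < b' → b' < s.length →
        gv s a' + gv s b' ≤ k → gv s a' + gv s b' < st.1)) ∧
  (st.2 = none → st.1 = 0)

-- invariant carried by A's two-pointer loop (A's ij stores index pairs)
def InvA (s : List Int) (k : Int) (lo hi : Nat) (mv : Int) (ij : Option (Nat × Nat)) : Prop :=
  0 ≤ mv ∧ hi < s.length ∧
  (∀ b : Nat, hi < b → b < s.length → k < gv s lo + gv s b) ∧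
  (∀ a b : Nat, a < lo → a < b → b < s.length → gv s a + gv s b ≤ k → gv s a + gv s b ≤ mv) ∧
  (∀ p : Nat × Nat, ij = some p →
    p.1 < p.2 ∧ p.2 < s.length ∧ gv s p.1 + gv s p.2 = mv ∧ mv ≤ k ∧ 0 < mv ∧
    (∀ a b : Nat, a < p.1 → a < b → b < s.length → gv s a + gv s b ≤ k → gv s a + gv s b < mv)) ∧
  (ij = none → mv = 0)

lemma mofLoop_char (s : List Int) (k : Int) (hs : s.Pairwise (· ≤ ·)) :
    ∀ fuel lo hi mv ij, hi - lo ≤ fuel → InvA s k lo hi mv ij →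
      Char2 s k (((mofLoop s k lo hi mv ij).1,
        (mofLoop s k lo hi mv ij).2.map (fun p => (gv s p.1, gv s p.2)))) := by
  intro fuel
  induction fuel with
  | zero =>
    intro lo hi mv ij hfuel hinv
    obtain ⟨hmv0, hhi, H1, H2, H3, H4⟩ := hinv
    have hle : hi ≤ lo := by omega
    rw [mofLoop]
    simp only [if_neg (by omega : ¬ lo < hi)]
    refine ⟨hmv0, ?_, ?_, ?_⟩
    · intro a b hab hb hk
      rcases Nat.lt_or_ge a lo with h | h
      · exact H2 a b h hab hb hk
      · exfalso
        have hbgt : hi < b := by omega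
        have := H1 b hbgt hb
        have hla : gv s lo ≤ gv s a := gv_mono hs h (by omega)
        omega
    · intro p hp
      simp only [Option.map_eq_some_iff] at hp
      obtain ⟨q, hq, rfl⟩ := hp
      obtain ⟨h1, h2, h3, h4, h5, h6⟩ := H3 q hq
      exact ⟨q.1, q.2, h1, h2, h3, h4, h5, rfl, h6⟩
    · intro hnone
      simp only [Option.map_eq_none_iff] at hnone
      exact H4 hnone
  | succ fuel ih =>
    intro lo hi mv ij hfuel hinv
    obtain ⟨hmv0, hhi, H1, H2, H3, H4⟩ := hinv
    rw [mofLoop]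
    by_cases hlh : lo < hi
    · simp only [if_pos hlh]
      by_cases hsum : s.getD lo 0 + s.getD hi 0 ≤ k
      · simp only [if_pos hsum]
        by_cases himp : mv < s.getD lo 0 + s.getD hi 0
        · simp only [if_pos himp]
          apply ih (lo + 1) hi _ _ (by omega)
          refine ⟨by have := hmv0; simp [gv] at *; omega, hhi, ?_, ?_, ?_, ?_⟩
          · intro b hb hbn
            have := H1 b hb hbn
            have : gv s lo ≤ gv s (lo + 1) := gv_mono hs (by omega) (by omega)
            have := H1 b hb hbn
            omega
          · intro a b ha hab hbn hk
            rcases Nat.lt_or_ge a lo with h | h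
            · have := H2 a b h hab hbn hk
              simp [gv] at *; omega
            · have haeq : a = lo := by omega
              subst haeq
              rcases Nat.lt_or_ge hi b with h' | h'
              · exact absurd hk (by have := H1 b h' hbn; simp [gv] at *; omega)
              · have : gv s b ≤ gv s hi := gv_mono hs h' hhi
                simp [gv] at *; omega
          · intro p hp
            injection hp with hp; subst hp
            refine ⟨hlh, hhi, rfl, hsum, by simp [gv] at *; omega, ?_⟩
            intro a b ha hab hbn hk
            have := H2 a b ha hab hbn hk
            simp [gv] at *; omega
          · intro h; cases h
        · simp only [if_neg himp]
          apply ih (lo + 1) hi _ _ (by omega)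
          refine ⟨hmv0, hhi, ?_, ?_, H3, H4⟩
          · intro b hb hbn
            have h1 := H1 b hb hbn
            have h2 : gv s lo ≤ gv s (lo + 1) := gv_mono hs (by omega) (by omega)
            omega
          · intro a b ha hab hbn hk
            rcases Nat.lt_or_ge a lo with h | h
            · exact H2 a b h hab hbn hk
            · have haeq : a = lo := by omega
              subst haeq
              rcases Nat.lt_or_ge hi b with h' | h'
              · exact absurd hk (by have := H1 b h' hbn; simp [gv] at *; omega)
              · have : gv s b ≤ gv s hi := gv_mono hs h' hhi
                simp [gv] at *; omega
      · simp only [if_neg hsum]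
        apply ih lo (hi - 1) _ _ (by omega)
        refine ⟨hmv0, by omega, ?_, H2, H3, H4⟩
        intro b hb hbn
        rcases Nat.lt_or_ge hi b with h | h
        · exact H1 b h hbn
        · have hbe : b = hi := by omega
          subst hbe
          simp [gv] at *; omega
    · simp only [if_neg hlh]
      refine ⟨hmv0, ?_, ?_, ?_⟩
      · intro a b hab hb hk
        rcases Nat.lt_or_ge a lo with h | h
        · exact H2 a b h hab hb hk
        · exfalso
          have hbgt : hi < b := by omega
          have := H1 b hbgt hb
          have hla : gv s lo ≤ gv s a := gv_mono hs h (by omega)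
          omega
      · intro p hp
        simp only [Option.map_eq_some_iff] at hp
        obtain ⟨q, hq, rfl⟩ := hp
        obtain ⟨h1, h2, h3, h4, h5, h6⟩ := H3 q hq
        exact ⟨q.1, q.2, h1, h2, h3, h4, h5, rfl, h6⟩
      · intro hnone
        simp only [Option.map_eq_none_iff] at hnone
        exact H4 hnone

-- invariant for B's loops, parametrized by the set P of already-processed pairs
def InvB (s : List Int) (k : Int) (P : Nat → Nat → Prop) (mv : Int)
    (bo : Option (Int × Int)) : Prop :=
  0 ≤ mv ∧
  (∀ a b : Nat, P a b → a < b → b < s.length → gv s a + gv s b ≤ k → gv s a + gv s b ≤ mv) ∧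
  (∀ p, bo = some p →
    ∃ a b : Nat, P a b ∧ a < b ∧ b < s.length ∧ gv s a + gv s b = mv ∧ mv ≤ k ∧ 0 < mv ∧
      p = (gv s a, gv s b) ∧
      (∀ a' b' : Nat, a' < a → a' < b' → b' < s.length →
        gv s a' + gv s b' ≤ k → gv s a' + gv s b' < mv)) ∧
  (bo = none → mv = 0)

lemma invB_iff (s : List Int) (k : Int) {P Q : Nat → Nat → Prop}
    (h : ∀ a b, a < b → b < s.length → (P a b ↔ Q a b)) (mv : Int) (bo : Option (Int × Int)) :
    InvB s k P mv bo → InvB s k Q mv bo := by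
  rintro ⟨h0, h1, h2, h3⟩
  refine ⟨h0, fun a b hq hab hb => h1 a b ((h a b hab hb).mpr hq) hab hb, ?_, h3⟩
  intro p hp
  obtain ⟨a, b, hP, hab, hb, rest⟩ := h2 p hp
  exact ⟨a, b, (h a b hab hb).mp hP, hab, hb, rest⟩

lemma altInner_char (s : List Int) (k : Int) (i : Nat) :
    ∀ fuel j mv bo, s.length - j ≤ fuel → i < j →
      InvB s k (fun a b => a < i ∨ (a = i ∧ b < j)) mv bo →
      InvB s k (fun a b => a < i + 1) (altInner s k i j mv bo).1 (altInner s k i j mv bo).2 := by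
  intro fuel
  induction fuel with
  | zero =>
    intro j mv bo hfuel hij hinv
    rw [altInner]
    simp only [if_neg (by omega : ¬ j < s.length)]
    exact invB_iff s k (by intro a b hab hb; constructor <;> intro h <;> omega) mv bo hinv
  | succ fuel ih =>
    intro j mv bo hfuel hij hinv
    obtain ⟨h0, h1, h2, h3⟩ := hinv
    rw [altInner]
    by_cases hj : j < s.length
    · simp only [if_pos hj]
      by_cases hc : s.getD i 0 + s.getD j 0 ≤ k ∧ mv < s.getD i 0 + s.getD j 0
      · simp only [if_pos hc]
        apply ih (j + 1) _ _ (by omega) (by omega)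
        obtain ⟨hck, hcm⟩ := hc
        refine ⟨by simp [gv] at *; omega, ?_, ?_, ?_⟩
        · intro a b hP hab hbn hk
          rcases hP with h | ⟨rfl, hb⟩
          · have := h1 a b (Or.inl h) hab hbn hk
            simp [gv] at *; omega
          · rcases Nat.lt_or_ge b j with h' | h'
            · have := h1 a b (Or.inr ⟨rfl, h'⟩) hab hbn hk
              simp [gv] at *; omega
            · have hbe : b = j := by omega
              subst hbe
              simp [gv]
        · intro p hp
          injection hp with hp; subst hp
          refine ⟨i, j, Or.inr ⟨rfl, by omega⟩, hij, hj, rfl, hck,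
            by simp [gv] at *; omega, rfl, ?_⟩
          intro a' b' ha' hab' hbn' hk'
          have := h1 a' b' (Or.inl ha') hab' hbn' hk'
          simp [gv] at *; omega
        · intro h; cases h
      · simp only [if_neg hc]
        apply ih (j + 1) _ _ (by omega) (by omega)
        refine ⟨h0, ?_, ?_, h3⟩
        · intro a b hP hab hbn hk
          rcases hP with h | ⟨rfl, hb⟩
          · exact h1 a b (Or.inl h) hab hbn hk
          · rcases Nat.lt_or_ge b j with h' | h'
            · exact h1 a b (Or.inr ⟨rfl, h'⟩) hab hbn hk
            · have hbe : b = j := by omega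
              subst hbe
              simp [gv] at *; omega
        · intro p hp
          obtain ⟨a, b, hP, rest⟩ := h2 p hp
          refine ⟨a, b, ?_, rest⟩
          rcases hP with h | ⟨rfl, hb⟩
          · exact Or.inl h
          · exact Or.inr ⟨rfl, by omega⟩
    · simp only [if_neg hj]
      exact invB_iff s k (by intro a b hab hb; constructor <;> intro h <;> omega) mv bo ⟨h0, h1, h2, h3⟩

lemma altOuter_char (s : List Int) (k : Int) :
    ∀ fuel i mv bo, s.length - i ≤ fuel →
      InvB s k (fun a b => a < i) mv bo →
      Char2 s k (altOuter s k i mv bo) := by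
  intro fuel
  induction fuel with
  | zero =>
    intro i mv bo hfuel hinv
    obtain ⟨h0, h1, h2, h3⟩ := hinv
    rw [altOuter]
    simp only [if_neg (by omega : ¬ i < s.length)]
    refine ⟨h0, ?_, ?_, h3⟩
    · intro a b hab hb hk
      exact h1 a b (by omega) hab hb hk
    · intro p hp
      obtain ⟨a, b, _, rest⟩ := h2 p hp
      exact ⟨a, b, rest⟩
  | succ fuel ih =>
    intro i mv bo hfuel hinv
    rw [altOuter]
    by_cases hi : i < s.length
    · simp only [if_pos hi]
      apply ih (i + 1) _ _ (by omega)
      have hstart : InvB s k (fun a b => a < i ∨ (a = i ∧ b < i + 1)) mv bo :=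
        invB_iff s k (by intro a b hab hb; constructor <;> intro h <;> omega) mv bo hinv
      exact altInner_char s k i (s.length - (i + 1)) (i + 1) mv bo (by omega) (by omega) hstart
  -- note: the 'InvB (fun a b => a < i ∨ (a = i ∧ b < i+1))' set equals 'a < i' on pairs a < b
    · simp only [if_neg hi]
      obtain ⟨h0, h1, h2, h3⟩ := hinv
      refine ⟨h0, ?_, ?_, h3⟩
      · intro a b hab hb hk
        exact h1 a b (by omega) hab hb hk
      · intro p hp
        obtain ⟨a, b, _, rest⟩ := h2 p hp
        exact ⟨a, b, rest⟩

-- two states satisfying Char2 project to the same answer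
lemma char2_unique (s : List Int) (k : Int) (st1 st2 : Int × Option (Int × Int))
    (h1 : Char2 s k st1) (h2 : Char2 s k st2) :
    (match st1.2 with | some p => p | none => ((0 : Int), (0 : Int))) =
    (match st2.2 with | some p => p | none => ((0 : Int), (0 : Int))) := by
  obtain ⟨h10, h11, h12, h13⟩ := h1
  obtain ⟨h20, h21, h22, h23⟩ := h2
  cases ho1 : st1.2 with
  | none =>
    cases ho2 : st2.2 with
    | none => simp
    | some p =>
      obtain ⟨a, b, hab, hb, hsum, hk, hpos, hp, _⟩ := h22 p ho2
      have := h11 a b hab hb (by omega)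
      have := h13 ho1
      omega
  | some p =>
    obtain ⟨a, b, hab, hb, hsum, hk, hpos, hp, hmin⟩ := h12 p ho1
    cases ho2 : st2.2 with
    | none =>
      have := h21 a b hab hb (by omega)
      have := h23 ho2
      omega
    | some q =>
      obtain ⟨a', b', hab', hb', hsum', hk', hpos', hq, hmin'⟩ := h22 q ho2
      -- the two maxima agree
      have hle1 : st1.1 ≤ st2.1 := by
        have := h21 a b hab hb (by omega)
        omega
      have hle2 : st2.1 ≤ st1.1 := by
        have := h11 a' b' hab' hb' (by omega)
        omega
      have hM : st1.1 = st2.1 := le_antisymm hle1 hle2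
      -- the two first coordinates agree
      have haa : a = a' := by
        rcases Nat.lt_trichotomy a a' with h | h | h
        · have := hmin' a b h hab hb (by omega)
          omega
        · exact h
        · have := hmin a' b' h hab' hb' (by omega)
          omega
      subst haa
      have hvb : gv s b = gv s b' := by omega
      simp [hp, hq, hvb]

-- initial invariant for A's loop (nonempty list)
lemma invA_init (s : List Int) (k : Int) (hne : s ≠ []) :
    InvA s k 0 (s.length - 1) 0 none := by
  have hlen : 0 < s.length := List.length_pos_iff.mpr hne
  refine ⟨le_refl 0, by omega, ?_, ?_, ?_, fun _ => rfl⟩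
  · intro b hb hbn; omega
  · intro a b ha; omega
  · intro p hp; cases hp

lemma invB_init (s : List Int) (k : Int) : InvB s k (fun a b => a < 0) 0 none := by
  refine ⟨le_refl 0, ?_, ?_, fun _ => rfl⟩
  · intro a b h; omega
  · intro p hp; cases hp

-- the ports agree on every input (the Pre_ hypothesis is not even needed for the
-- ports themselves: on no-pair inputs both loops end with none and both return (0,0))
lemma main_eq (s : List Int) (k : Int) (hpw : s.Pairwise (· ≤ ·)) :
    (match (mofLoop s k 0 (s.length - 1) 0 none).2 with
     | some (i, j) => (s.getD i 0, s.getD j 0)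
     | none => ((0 : Int), (0 : Int))) =
    (match (altOuter s k 0 0 none).2 with
     | some p => p
     | none => ((0 : Int), (0 : Int))) := by
  by_cases hne : s = []
  · subst hne
    rw [mofLoop, altOuter]
    simp
  · have hA := mofLoop_char s k hpw (s.length - 1) 0 (s.length - 1) 0 none
      (by omega) (invA_init s k hne)
    have hB := altOuter_char s k s.length 0 0 none (by omega) (invB_init s k)
    have huniq := char2_unique s k
      ((mofLoop s k 0 (s.length - 1) 0 none).1,
        (mofLoop s k 0 (s.length - 1) 0 none).2.map (fun p => (gv s p.1, gv s p.2)))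
      (altOuter s k 0 0 none) hA hB
    simp only at huniq
    cases hmA : (mofLoop s k 0 (s.length - 1) 0 none).2 with
    | none =>
      rw [hmA] at huniq
      cases hmB : (altOuter s k 0 0 none).2 with
      | none => simp
      | some q => rw [hmB] at huniq; simpa using huniq
    | some p =>
      rw [hmA] at huniq
      cases hmB : (altOuter s k 0 0 none).2 with
      | none => rw [hmB] at huniq; simpa [gv] using huniq
      | some q => rw [hmB] at huniq; simpa [gv] using huniq

-- the ports agree on every input (the Pre_ hypothesis is not even needed for the
-- ports themselves: on no-pair inputs both loops end with none and both return (0,0))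
lemma mof_eq_alt (arr : List Int) (k : Int) : mof arr k = mof_alt arr k := by
  unfold mof mof_alt
  exact main_eq (PySem.List.sorted arr (fun x => x) false) (k - 30)
    (PySem.List.sorted_pairwise arr (fun x => x))

-- ===== VERDICT (by name: the statement is the Claim_ definition above) =====
theorem mof_spec : Claim_equal_mof := by
  intro arr k _ _
  unfold Spec_mof
  exact mof_eq_alt arr k
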